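-- pv_equiv track=rewrite | github.com/christopherwallis/AdventOfCode2021 | 2021-12-10/day10.py | read_in_line
-- ===== SOURCE A (Python) =====
-- def read_in_line(line):
--     opening = ['(', '[', '{', '<']
--     closing = [')', ']', '}', '>']
--     stack = []
--     expecting = None
--     for character in line:
--         # Check for opening characters
--         if character in opening:
--             for bracket in range(len(opening)):
--                 if character == opening[bracket]:
--                     if expecting:
--                         stack.append(expecting)
--                     expecting = closing[bracket]
--
--         # Check for closing characters
--         elif character in closing:
--             if character == expecting:
--                 if len(stack) == 0:
--                     expecting = None
--                 else:
--                     expecting = stack[-1]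
--                     stack.pop()
--             else:
--                 return character
--     return None
-- ===== SOURCE B (Python) =====
-- def read_in_line(line):
--     # Offline rewriting: keep only bracket characters, repeatedly cancel adjacent
--     # matched pairs until a normal form is reached; the first closer left (if any)
--     # is the corrupt character.
--     pairs = ('()', '[]', '{}', '<>')
--     s = [c for c in line if c in '()[]{}<>']
--     changed = True
--     while changed:
--         changed = False
--         out = []
--         i = 0
--         while i < len(s):
--             if i + 1 < len(s) and s[i] + s[i + 1] in pairs:
--                 i += 2
--                 changed = True
--             else:
--                 out.append(s[i])
--                 i += 1
--         s = out
--     for c in s: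
--         if c in ')]}>':
--             return c
--     return None
-- ===== Notes on version B (the rewrite author's own statement) =====
-- stated objective: alternative
-- what changed: A is an online stack machine (scalar `expecting` plus spill stack, index-scan to find the matching closer); B is an offline string-rewriting reduction: it filters out non-bracket characters, repeatedly cancels adjacent matched pairs until a normal form is reached, and returns the first closing bracket left in the normal form.
import Mathlib
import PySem

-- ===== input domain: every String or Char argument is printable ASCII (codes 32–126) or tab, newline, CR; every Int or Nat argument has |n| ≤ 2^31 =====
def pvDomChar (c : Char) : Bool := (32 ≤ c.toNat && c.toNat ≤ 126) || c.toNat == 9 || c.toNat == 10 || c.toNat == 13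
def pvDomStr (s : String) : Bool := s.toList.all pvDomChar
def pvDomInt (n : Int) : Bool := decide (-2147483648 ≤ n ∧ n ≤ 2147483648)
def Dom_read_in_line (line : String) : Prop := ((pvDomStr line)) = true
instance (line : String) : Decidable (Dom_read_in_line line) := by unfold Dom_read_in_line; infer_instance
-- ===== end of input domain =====

-- B replaces A's online stack machine by an offline rewriting: filter brackets, repeatedly
-- cancel adjacent matched pairs to a normal form, return its first closer; objective: alternative.


-- ===== PORT A =====
def pvOpening : List Char := ['(', '[', '{', '<']
def pvClosing : List Char := [')', ']', '}', '>']

-- inner loop `for bracket in range(len(opening)): …` (indices are in range, so getD is exact)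
def pvStepOpen (c : Char) (st : List Char × Option Char) (b : Nat) : List Char × Option Char :=
  if c = pvOpening.getD b ' ' then
    ((match st.2 with
      | some x => x :: st.1        -- stack.append(expecting)  (stack kept most-recent-first)
      | none => st.1), some (pvClosing.getD b ' '))
  else st

def pvReadA : List Char → List Char → Option Char → Option String
  | [], _, _ => none
  | c :: rest, stack, exp =>
    if c ∈ pvOpening then
      let st := (List.range pvOpening.length).foldl (pvStepOpen c) (stack, exp)
      pvReadA rest st.1 st.2
    else if c ∈ pvClosing then
      if some c = exp then
        match stack with
        | [] => pvReadA rest [] none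
        | t :: s => pvReadA rest s (some t)   -- expecting = stack[-1]; stack.pop()
      else some (String.ofList [c])
    else pvReadA rest stack exp

def read_in_line (line : String) : Option String := pvReadA line.toList [] none

-- ===== PORT B =====
def pvIsBracket (c : Char) : Bool :=
  c == '(' || c == ')' || c == '[' || c == ']' || c == '{' || c == '}' || c == '<' || c == '>'

-- `s[i] + s[i+1] in pairs`
def pvMatched (a b : Char) : Bool :=
  (a == '(' && b == ')') || (a == '[' && b == ']') || (a == '{' && b == '}') || (a == '<' && b == '>')

-- one pass of the inner `while i < len(s)` loop; second component is `changed`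
def pvOnePass : List Char → List Char × Bool
  | [] => ([], false)
  | [c] => ([c], false)
  | a :: b :: t =>
    if pvMatched a b then ((pvOnePass t).1, true)
    else ((a :: (pvOnePass (b :: t)).1), (pvOnePass (b :: t)).2)

theorem pvOnePass_len_le (s : List Char) : (pvOnePass s).1.length ≤ s.length := by
  induction s using pvOnePass.induct with
  | case1 => simp [pvOnePass]
  | case2 c => simp [pvOnePass]
  | case3 a b t h ih =>
    simp only [pvOnePass, if_pos h, List.length_cons]
    omega
  | case4 a b t h ih =>
    simp only [pvOnePass, if_neg h, List.length_cons]
    simp only [List.length_cons] at ih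
    omega

theorem pvOnePass_len_lt (s : List Char) (h : (pvOnePass s).2 = true) :
    (pvOnePass s).1.length < s.length := by
  induction s using pvOnePass.induct with
  | case1 => simp [pvOnePass] at h
  | case2 c => simp [pvOnePass] at h
  | case3 a b t hm ih =>
    simp only [pvOnePass, if_pos hm, List.length_cons]
    have := pvOnePass_len_le t
    omega
  | case4 a b t hm ih =>
    simp only [pvOnePass, if_neg hm] at h
    simp only [pvOnePass, if_neg hm, List.length_cons]
    have := ih h
    simp only [List.length_cons] at this
    omega

-- the outer `while changed` loop
def pvReduce (s : List Char) : List Char :=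
  if h : (pvOnePass s).2 = true then pvReduce (pvOnePass s).1 else (pvOnePass s).1
termination_by s.length
decreasing_by exact pvOnePass_len_lt s h

def pvClosersB : List Char := [')', ']', '}', '>']

-- final `for c in s: if c in ')]}>': return c`
def pvFirstCloser : List Char → Option Char
  | [] => none
  | c :: t => if c ∈ pvClosersB then some c else pvFirstCloser t

def read_in_line_alt (line : String) : Option String :=
  (pvFirstCloser (pvReduce (line.toList.filter pvIsBracket))).map (fun c => String.ofList [c])

-- ===== PRECONDITION & SPEC =====
def Spec_read_in_line (line : String) (out : Option String) : Prop := out = read_in_line_alt line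
instance (line : String) (out : Option String) : Decidable (Spec_read_in_line line out) := by unfold Spec_read_in_line; infer_instance

-- ===== CLAIM (what is proved, stated in full; the proofs are below) =====
def Claim_equal_read_in_line : Prop := ∀ (line : String), Dom_read_in_line line → Spec_read_in_line line (read_in_line line)

-- ===== LEMMAS AND PROOFS =====

-- Reference machine: one stack of expected closers (proof-side only).
def pvCloserOf? (c : Char) : Option Char :=
  if c = '(' then some ')' else if c = '[' then some ']'
  else if c = '{' then some '}' else if c = '<' then some '>' else none

def pvM : List Char → List Char → Option Char
  | [], _ => none
  | c :: t, st =>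
    match pvCloserOf? c with
    | some cl => pvM t (cl :: st)
    | none =>
      if c ∈ pvClosing then
        match st with
        | [] => some c
        | e :: s => if e = c then pvM t s else some c
      else pvM t st

def pvExpToList : Option Char → List Char
  | none => []
  | some x => [x]

theorem pvCloserOf?_of_closing {c : Char} (h : c ∈ pvClosing) : pvCloserOf? c = none := by
  simp only [pvClosing, List.mem_cons, List.not_mem_nil, or_false] at h
  rcases h with rfl | rfl | rfl | rfl <;> rfl

theorem pvReadA_eq_pvM (l : List Char) :
    ∀ (stack : List Char) (exp : Option Char), (exp = none → stack = []) →
      pvReadA l stack exp = (pvM l (pvExpToList exp ++ stack)).map (fun c => String.ofList [c]) := by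
  induction l with
  | nil => intro stack exp _; rfl
  | cons c rest ih =>
    intro stack exp hinv
    by_cases hop : c ∈ pvOpening
    · -- opener: A pushes `expecting` (if any) and sets the new closer; M pushes the closer
      simp only [pvOpening, List.mem_cons, List.not_mem_nil, or_false] at hop
      rcases exp with _ | x
      · rw [hinv rfl]
        rcases hop with rfl | rfl | rfl | rfl
        · exact ih [] (some ')') (by simp)
        · exact ih [] (some ']') (by simp)
        · exact ih [] (some '}') (by simp)
        · exact ih [] (some '>') (by simp)
      · rcases hop with rfl | rfl | rfl | rfl
        · exact ih (x :: stack) (some ')') (by simp)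
        · exact ih (x :: stack) (some ']') (by simp)
        · exact ih (x :: stack) (some '}') (by simp)
        · exact ih (x :: stack) (some '>') (by simp)
    · by_cases hcl : c ∈ pvClosing
      · have hn : pvCloserOf? c = none := pvCloserOf?_of_closing hcl
        rcases exp with _ | x
        · -- closer with nothing expected: both return the character
          rw [hinv rfl]
          rw [pvReadA.eq_def]
          simp [hop, hcl, hn, pvExpToList, pvM]
        · rw [pvReadA.eq_def]
          simp only [pvExpToList, List.cons_append, pvM, hn, if_neg hop, if_pos hcl]
          by_cases hx : x = c
          · subst hx
            simp only [↓reduceIte]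
            cases stack with
            | nil => simpa using ih [] none (fun _ => rfl)
            | cons t s => simpa using ih s (some t) (by simp)
          · have hne : ¬(some c = some x) := fun h => hx (Option.some.inj h).symm
            simp [hne, hx]
      · -- any other character is ignored by both
        have h1 := hop
        simp only [pvOpening, List.mem_cons, List.not_mem_nil, or_false, not_or] at h1
        obtain ⟨a1, a2, a3, a4⟩ := h1
        have hn : pvCloserOf? c = none := by
          simp [pvCloserOf?, a1, a2, a3, a4]
        rw [pvReadA.eq_def]
        simp only [pvM, hn, if_neg hop, if_neg hcl]
        exact ih stack exp hinv

theorem pvBracket_of_opening {c : Char} (h : c ∈ pvOpening) : pvIsBracket c = true := by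
  simp only [pvOpening, List.mem_cons, List.not_mem_nil, or_false] at h
  rcases h with rfl | rfl | rfl | rfl <;> rfl

theorem pvBracket_of_closing {c : Char} (h : c ∈ pvClosing) : pvIsBracket c = true := by
  simp only [pvClosing, List.mem_cons, List.not_mem_nil, or_false] at h
  rcases h with rfl | rfl | rfl | rfl <;> rfl

theorem pvCloserOf?_of_opening {c : Char} (h : c ∈ pvOpening) :
    ∃ cl, pvCloserOf? c = some cl := by
  simp only [pvOpening, List.mem_cons, List.not_mem_nil, or_false] at h
  rcases h with rfl | rfl | rfl | rfl <;> exact ⟨_, rfl⟩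

theorem pvBracket_cases {c : Char} (h : pvIsBracket c = true) :
    c ∈ pvOpening ∨ c ∈ pvClosing := by
  simp only [pvIsBracket, Bool.or_eq_true, beq_iff_eq] at h
  simp only [pvOpening, pvClosing, List.mem_cons, List.not_mem_nil, or_false]
  tauto

theorem pvM_filter (l : List Char) :
    ∀ st, pvM l st = pvM (l.filter pvIsBracket) st := by
  induction l with
  | nil => intro st; rfl
  | cons c t ih =>
    intro st
    by_cases hop : c ∈ pvOpening
    · obtain ⟨cl, hcl⟩ := pvCloserOf?_of_opening hop
      rw [List.filter_cons_of_pos (pvBracket_of_opening hop)]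
      simp only [pvM, hcl]
      exact ih (cl :: st)
    · by_cases hclo : c ∈ pvClosing
      · have hn : pvCloserOf? c = none := pvCloserOf?_of_closing hclo
        rw [List.filter_cons_of_pos (pvBracket_of_closing hclo)]
        simp only [pvM, hn, if_pos hclo]
        cases st with
        | nil => rfl
        | cons e s => by_cases he : e = c <;> simp [he, ih s]
      · have h1 := hop
        simp only [pvOpening, List.mem_cons, List.not_mem_nil, or_false, not_or] at h1
        obtain ⟨a1, a2, a3, a4⟩ := h1
        have h2 := hclo
        simp only [pvClosing, List.mem_cons, List.not_mem_nil, or_false, not_or] at h2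
        obtain ⟨b1, b2, b3, b4⟩ := h2
        have hn : pvCloserOf? c = none := by
          simp [pvCloserOf?, a1, a2, a3, a4]
        have hbr : pvIsBracket c = false := by
          simp [pvIsBracket, a1, a2, a3, a4, b1, b2, b3, b4]
        rw [List.filter_cons_of_neg (by simp [hbr])]
        simp only [pvM, hn, if_neg hclo]
        exact ih st

theorem pvMatched_opener (a b : Char) (h : pvMatched a b = true) :
    pvCloserOf? a = some b ∧ b ∈ pvClosing := by
  simp only [pvMatched, Bool.or_eq_true, Bool.and_eq_true, beq_iff_eq] at h
  obtain ((⟨rfl, rfl⟩ | ⟨rfl, rfl⟩) | ⟨rfl, rfl⟩) | ⟨rfl, rfl⟩ := h <;>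
    exact ⟨rfl, by decide⟩

theorem pvM_onePass (s : List Char) :
    ∀ st, pvM (pvOnePass s).1 st = pvM s st := by
  induction s using pvOnePass.induct with
  | case1 => intro st; rfl
  | case2 c => intro st; rfl
  | case3 a b t h ih =>
    intro st
    obtain ⟨ha, hb⟩ := pvMatched_opener a b h
    have hbn : pvCloserOf? b = none := by
      have hb2 := hb
      simp only [pvClosing, List.mem_cons, List.not_mem_nil, or_false] at hb2
      rcases hb2 with rfl | rfl | rfl | rfl <;> rfl
    simp only [pvOnePass, if_pos h]
    rw [ih st]
    simp only [pvM, ha, hbn]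
    simp [hb]
  | case4 a b t h ih =>
    intro st
    simp only [pvOnePass, if_neg h]
    simp only [pvM]
    cases hca : pvCloserOf? a with
    | some cl => exact ih (cl :: st)
    | none =>
      by_cases hcl : a ∈ pvClosing
      · simp only [if_pos hcl]
        cases st with
        | nil => rfl
        | cons e s => by_cases he : e = a <;> simp [he, ih s, pvM]
      · simp only [if_neg hcl]
        exact ih st

theorem pvOnePass_id (s : List Char) (h : (pvOnePass s).2 = false) : (pvOnePass s).1 = s := by
  induction s using pvOnePass.induct with
  | case1 => rfl
  | case2 c => rfl
  | case3 a b t hm ih => simp [pvOnePass, if_pos hm] at h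
  | case4 a b t hm ih =>
    simp only [pvOnePass, if_neg hm] at h ⊢
    rw [ih h]

def pvNoAdj : List Char → Bool
  | [] => true
  | [_] => true
  | a :: b :: t => !pvMatched a b && pvNoAdj (b :: t)

theorem pvNoAdj_of_onePass (s : List Char) (h : (pvOnePass s).2 = false) : pvNoAdj s = true := by
  induction s using pvOnePass.induct with
  | case1 => rfl
  | case2 c => rfl
  | case3 a b t hm ih => simp [pvOnePass, if_pos hm] at h
  | case4 a b t hm ih =>
    simp only [pvOnePass, if_neg hm] at h
    simp [pvNoAdj, hm, ih h]

theorem pvMem_onePass (s : List Char) {c : Char} (h : c ∈ (pvOnePass s).1) : c ∈ s := by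
  induction s using pvOnePass.induct with
  | case1 => simpa [pvOnePass] using h
  | case2 d => simpa [pvOnePass] using h
  | case3 a b t hm ih =>
    simp only [pvOnePass, if_pos hm] at h
    simp [List.mem_cons, ih h]
  | case4 a b t hm ih =>
    simp only [pvOnePass, if_neg hm, List.mem_cons] at h
    rcases h with rfl | h
    · simp
    · simp only [List.mem_cons] at ih ⊢
      tauto

theorem pvM_reduce (s : List Char) : ∀ st, pvM (pvReduce s) st = pvM s st := by
  induction s using pvReduce.induct with
  | case1 s h ih =>
    intro st
    rw [pvReduce, dif_pos h, ih st, pvM_onePass]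
  | case2 s h =>
    intro st
    rw [pvReduce, dif_neg h, pvM_onePass]

theorem pvNoAdj_reduce (s : List Char) : pvNoAdj (pvReduce s) = true := by
  induction s using pvReduce.induct with
  | case1 s h ih => rw [pvReduce, dif_pos h]; exact ih
  | case2 s h =>
    rw [pvReduce, dif_neg h]
    have h2 : (pvOnePass s).2 = false := by simpa using h
    rw [pvOnePass_id s h2]
    exact pvNoAdj_of_onePass s h2

theorem pvMem_reduce (s : List Char) {c : Char} (h : c ∈ pvReduce s) : c ∈ s := by
  induction s using pvReduce.induct with
  | case1 s h1 ih =>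
    rw [pvReduce, dif_pos h1] at h
    exact pvMem_onePass s (ih h)
  | case2 s h1 =>
    rw [pvReduce, dif_neg h1] at h
    exact pvMem_onePass s h

theorem pvNoAdj_tail {c : Char} {t : List Char} (h : pvNoAdj (c :: t) = true) :
    pvNoAdj t = true := by
  cases t with
  | nil => rfl
  | cons b t' =>
    simp only [pvNoAdj, Bool.and_eq_true] at h
    exact h.2

theorem pvMatched_of_closerOf {c cl : Char} (hop : c ∈ pvOpening)
    (h : pvCloserOf? c = some cl) : pvMatched c cl = true := by
  simp only [pvOpening, List.mem_cons, List.not_mem_nil, or_false] at hop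
  rcases hop with rfl | rfl | rfl | rfl <;> (simp [pvCloserOf?] at h; subst h; decide)

theorem pvNotCloserB_of_opening {c : Char} (h : c ∈ pvOpening) : c ∉ pvClosersB := by
  simp only [pvOpening, List.mem_cons, List.not_mem_nil, or_false] at h
  rcases h with rfl | rfl | rfl | rfl <;> decide

theorem pvCloserB_of_closing {c : Char} (h : c ∈ pvClosing) : c ∈ pvClosersB := by
  simp only [pvClosing, List.mem_cons, List.not_mem_nil, or_false] at h
  rcases h with rfl | rfl | rfl | rfl <;> decide

theorem pvM_noAdj (s : List Char) :
    ∀ st, (∀ c ∈ s, pvIsBracket c = true) → pvNoAdj s = true →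
      (∀ c t e st', s = c :: t → st = e :: st' → c ∈ pvClosing → e ≠ c) →
      pvM s st = pvFirstCloser s := by
  induction s with
  | nil => intro st _ _ _; rfl
  | cons c t ih =>
    intro st hb hna hcond
    rcases pvBracket_cases (hb c (by simp)) with hop | hclo
    · -- opener: M pushes its closer; the first closer of the list is unchanged
      obtain ⟨cl, hcl⟩ := pvCloserOf?_of_opening hop
      simp only [pvM, hcl, pvFirstCloser, if_neg (pvNotCloserB_of_opening hop)]
      apply ih (cl :: st) (fun d hd => hb d (by simp [hd])) (pvNoAdj_tail hna)
      intro c' t' e st'' ht hst hc'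
      cases ht
      have he : cl = e := (List.cons.inj hst).1
      subst he
      intro hec
      subst hec
      -- then c and c' would be an adjacent matched pair, contradicting pvNoAdj
      simp only [pvNoAdj, Bool.and_eq_true, Bool.not_eq_true'] at hna
      exact absurd (pvMatched_of_closerOf hop hcl) (by simp [hna.1])
    · -- closer: by the stack condition the top mismatches, so M stops here, as does the scan
      have hn : pvCloserOf? c = none := pvCloserOf?_of_closing hclo
      simp only [pvM, hn, if_pos hclo, pvFirstCloser, if_pos (pvCloserB_of_closing hclo)]
      cases st with
      | nil => rfl
      | cons e s =>
        have hne : e ≠ c := hcond c t e s rfl rfl hclo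
        simp [hne]

-- ===== VERDICT (by name: the statement is the Claim_ definition above) =====
theorem read_in_line_spec : Claim_equal_read_in_line := by
  intro line _
  unfold Spec_read_in_line read_in_line read_in_line_alt
  rw [pvReadA_eq_pvM line.toList [] none (fun _ => rfl)]
  rw [pvM_filter, ← pvM_reduce]
  rw [pvM_noAdj]
  · intro c hc
    have := pvMem_reduce _ hc
    exact (List.mem_filter.mp this).2
  · exact pvNoAdj_reduce _
  · intro c t e st' _ h; simp [pvExpToList] at h
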